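-- pv_equiv track=rewrite | github.com/szelesaron/CS_GO_AI_competition | prediction_by_row_notdone.py | sector_columns
-- ===== SOURCE A (Python) =====
-- def sector_columns(sector_list):
--     s1, s2, s3, s4, s5, s6, s7, s8, s9 = ([] for i in range(9))
--     s1_count, s2_count, s3_count, s4_count, s5_count, s6_count, s7_count, s8_count, s9_count = (0 for i in range(9))
--     for i in sector_list:
--         if i == "next_row":
--             s1.append(s1_count)
--             s2.append(s2_count)
--             s3.append(s3_count)
--             s4.append(s4_count)
--             s5.append(s5_count)
--             s6.append(s6_count)
--             s7.append(s7_count)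
--             s8.append(s8_count)
--             s9.append(s9_count)
--             s1_count, s2_count, s3_count, s4_count, s5_count, s6_count, s7_count, s8_count, s9_count = (0 for i in range(9))
--         else:
--             if i == "11":
--                 s1_count += 1
--             elif i == "12":
--                 s2_count += 1
--             elif i == "13":
--                 s3_count += 1
--             elif i == "21":
--                 s4_count += 1
--             elif i == "22":
--                 s5_count += 1
--             elif i == "23":
--                 s6_count += 1
--             elif i == "31":
--                 s7_count += 1
--             elif i == "32":
--                 s8_count += 1
--             elif i == "33":
--                 s9_count += 1
--     return s1,s2,s3,s4,s5,s6,s7,s8,s9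
-- ===== SOURCE B (Python) =====
-- def sector_columns(sector_list):
--     # staged passes: marker positions first, then per-label prefix counts,
--     # and each row count is a difference of prefix counts at marker positions.
--     labels = ("11", "12", "13", "21", "22", "23", "31", "32", "33")
--     marks = [i for i, x in enumerate(sector_list) if x == "next_row"]
--
--     def column(lab):
--         pref = [0]
--         for x in sector_list:
--             pref.append(pref[-1] + (x == lab))
--         out, prev = [], 0
--         for m in marks:
--             out.append(pref[m] - pref[prev])
--             prev = m
--         return out
--
--     return tuple(column(lab) for lab in labels)
-- ===== Notes on version B (the rewrite author's own statement) =====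
-- stated objective: alternative
-- what changed: Replaces the single-pass loop with nine named counters and a 10-way if/elif chain by staged passes: collect the marker indices once, build a prefix-count array per label over the whole list, and read each row count as the difference of prefix counts at consecutive marker positions.
import Mathlib
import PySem

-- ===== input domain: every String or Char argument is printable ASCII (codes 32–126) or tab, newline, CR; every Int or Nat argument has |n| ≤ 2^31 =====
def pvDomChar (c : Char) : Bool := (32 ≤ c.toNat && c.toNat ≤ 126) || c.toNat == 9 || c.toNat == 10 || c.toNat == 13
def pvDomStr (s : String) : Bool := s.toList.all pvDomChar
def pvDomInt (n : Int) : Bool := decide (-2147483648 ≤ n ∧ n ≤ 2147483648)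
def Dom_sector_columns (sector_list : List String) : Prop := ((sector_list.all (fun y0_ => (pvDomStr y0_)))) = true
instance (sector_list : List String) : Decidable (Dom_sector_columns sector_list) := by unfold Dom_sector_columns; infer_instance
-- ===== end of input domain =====

-- B replaces A's single-pass nine-counter loop by staged passes: marker indices,
-- per-label prefix-count arrays, and row counts as prefix differences at markers;
-- objective: alternative. Equivalence proved on all inputs.


-- ===== PORT A =====
-- loop state: the nine result lists s1..s9 and the nine running counters c1..c9
structure StA where
  s1 : List Int
  s2 : List Int
  s3 : List Int
  s4 : List Int
  s5 : List Int
  s6 : List Int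
  s7 : List Int
  s8 : List Int
  s9 : List Int
  c1 : Int
  c2 : Int
  c3 : Int
  c4 : Int
  c5 : Int
  c6 : Int
  c7 : Int
  c8 : Int
  c9 : Int

-- one iteration of A's for-loop, branch for branch
def stepA (st : StA) (i : String) : StA :=
  if i = "next_row" then
    { s1 := st.s1 ++ [st.c1], s2 := st.s2 ++ [st.c2], s3 := st.s3 ++ [st.c3],
      s4 := st.s4 ++ [st.c4], s5 := st.s5 ++ [st.c5], s6 := st.s6 ++ [st.c6],
      s7 := st.s7 ++ [st.c7], s8 := st.s8 ++ [st.c8], s9 := st.s9 ++ [st.c9],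
      c1 := 0, c2 := 0, c3 := 0, c4 := 0, c5 := 0, c6 := 0, c7 := 0, c8 := 0, c9 := 0 }
  else if i = "11" then { st with c1 := st.c1 + 1 }
  else if i = "12" then { st with c2 := st.c2 + 1 }
  else if i = "13" then { st with c3 := st.c3 + 1 }
  else if i = "21" then { st with c4 := st.c4 + 1 }
  else if i = "22" then { st with c5 := st.c5 + 1 }
  else if i = "23" then { st with c6 := st.c6 + 1 }
  else if i = "31" then { st with c7 := st.c7 + 1 }
  else if i = "32" then { st with c8 := st.c8 + 1 }
  else if i = "33" then { st with c9 := st.c9 + 1 }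
  else st

def sector_columns (sector_list : List String) : List Int × List Int × List Int × List Int × List Int × List Int × List Int × List Int × List Int :=
  let st := sector_list.foldl stepA
    { s1 := [], s2 := [], s3 := [], s4 := [], s5 := [], s6 := [], s7 := [], s8 := [], s9 := [],
      c1 := 0, c2 := 0, c3 := 0, c4 := 0, c5 := 0, c6 := 0, c7 := 0, c8 := 0, c9 := 0 }
  (st.s1, st.s2, st.s3, st.s4, st.s5, st.s6, st.s7, st.s8, st.s9)

-- ===== PORT B =====
-- marker indices: [i for i, x in enumerate(sector_list) if x == "next_row"]
def marksIdx : List String → Nat → List Nat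
  | [], _ => []
  | x :: xs, i => if x = "next_row" then i :: marksIdx xs (i + 1) else marksIdx xs (i + 1)

-- the prefix-count loop body: pref.append(pref[-1] + (x == lab))
def prefGo (lab : String) (acc : Int) : List String → List Int
  | [] => []
  | x :: xs => (acc + (if x = lab then 1 else 0)) :: prefGo lab (acc + (if x = lab then 1 else 0)) xs

-- pref = [0]; for x in sector_list: pref.append(pref[-1] + (x == lab))
def prefs (lab : String) (xs : List String) : List Int := 0 :: prefGo lab 0 xs

-- for m in marks: out.append(pref[m] - pref[prev]); prev = m   (indices always in range; getD is a totality guard)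
def colGo (p : List Int) (prev : Nat) : List Nat → List Int
  | [] => []
  | m :: ms => (p.getD m 0 - p.getD prev 0) :: colGo p m ms

def column (lab : String) (xs : List String) : List Int :=
  colGo (prefs lab xs) 0 (marksIdx xs 0)

def sector_columns_alt (sector_list : List String) : List Int × List Int × List Int × List Int × List Int × List Int × List Int × List Int × List Int :=
  (column "11" sector_list, column "12" sector_list, column "13" sector_list,
   column "21" sector_list, column "22" sector_list, column "23" sector_list,
   column "31" sector_list, column "32" sector_list, column "33" sector_list)

-- ===== PRECONDITION & SPEC =====
def Spec_sector_columns (sector_list : List String) (out : List Int × List Int × List Int × List Int × List Int × List Int × List Int × List Int × List Int) : Prop := out = sector_columns_alt sector_list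
instance (sector_list : List String) (out : List Int × List Int × List Int × List Int × List Int × List Int × List Int × List Int × List Int) : Decidable (Spec_sector_columns sector_list out) := by
  unfold Spec_sector_columns
  have dL : DecidableEq (List Int) := inferInstance
  have d2 := @instDecidableEqProd _ _ dL dL
  have d3 := @instDecidableEqProd _ _ dL d2
  have d4 := @instDecidableEqProd _ _ dL d3
  have d5 := @instDecidableEqProd _ _ dL d4
  have d6 := @instDecidableEqProd _ _ dL d5
  have d7 := @instDecidableEqProd _ _ dL d6
  have d8 := @instDecidableEqProd _ _ dL d7
  exact @instDecidableEqProd _ _ dL d8 out (sector_columns_alt sector_list)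

-- ===== CLAIM (what is proved, stated in full; the proofs are below) =====
def Claim_equal_sector_columns : Prop := ∀ (sector_list : List String), Dom_sector_columns sector_list → Spec_sector_columns sector_list (sector_columns sector_list)

-- ===== LEMMAS AND PROOFS =====

-- canonical per-label column: emit the pending count at each marker
def counts (lab : String) : List String → Int → List Int
  | [], _ => []
  | x :: xs, c =>
    if x = "next_row" then c :: counts lab xs 0
    else counts lab xs (c + if x = lab then 1 else 0)

-- A's fold produces `counts` for each of the nine labels
lemma foldA (xs : List String) : ∀ (st : StA),
    ((xs.foldl stepA st).s1, (xs.foldl stepA st).s2, (xs.foldl stepA st).s3,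
     (xs.foldl stepA st).s4, (xs.foldl stepA st).s5, (xs.foldl stepA st).s6,
     (xs.foldl stepA st).s7, (xs.foldl stepA st).s8, (xs.foldl stepA st).s9)
    = (st.s1 ++ counts "11" xs st.c1, st.s2 ++ counts "12" xs st.c2,
       st.s3 ++ counts "13" xs st.c3, st.s4 ++ counts "21" xs st.c4,
       st.s5 ++ counts "22" xs st.c5, st.s6 ++ counts "23" xs st.c6,
       st.s7 ++ counts "31" xs st.c7, st.s8 ++ counts "32" xs st.c8,
       st.s9 ++ counts "33" xs st.c9) := by
  induction xs with
  | nil => intro st; simp [counts]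
  | cons x xs ih =>
    intro st
    rw [List.foldl_cons]
    by_cases hm : x = "next_row"
    · subst hm
      rw [ih]
      simp [stepA, counts]
    · rw [ih]
      simp only [stepA, if_neg hm]
      split_ifs with e1 e2 e3 e4 e5 e6 e7 e8 e9 <;>
        simp_all [counts]

-- the prefix list holds counts of lab over prefixes of xs
lemma prefGo_getD (lab : String) : ∀ (xs : List String) (acc : Int) (i : Nat), i ≤ xs.length →
    (acc :: prefGo lab acc xs).getD i 0 = acc + ((xs.take i).count lab : Int) := by
  intro xs
  induction xs with
  | nil =>
    intro acc i hi
    have : i = 0 := Nat.le_zero.mp hi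
    subst this; simp
  | cons x xs ih =>
    intro acc i hi
    cases i with
    | zero => simp
    | succ j =>
      have := ih (acc + (if x = lab then 1 else 0)) j (by simpa using hi)
      simp only [prefGo, List.getD_cons_succ] at this ⊢
      rw [this]
      by_cases hx : x = lab <;> simp [List.count_cons, hx, beq_iff_eq] <;> push_cast <;> ring

-- prefix differencing at markers computes `counts`
lemma colGo_counts (lab : String) (hlab : lab ≠ "next_row") :
    ∀ (xs : List String) (p : List Int) (base prev : Nat) (c c0 : Int),
      p.getD prev 0 = c0 →
      (∀ i, i ≤ xs.length → p.getD (base + i) 0 = c0 + c + ((xs.take i).count lab : Int)) →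
      colGo p prev (marksIdx xs base) = counts lab xs c := by
  intro xs
  induction xs with
  | nil => intro p base prev c c0 _ _; simp [marksIdx, colGo, counts]
  | cons x xs ih =>
    intro p base prev c c0 hprev hpre
    by_cases hm : x = "next_row"
    · subst hm
      have hbase : p.getD base 0 = c0 + c := by
        have := hpre 0 (by simp); simpa using this
      have htail : colGo p base (marksIdx xs (base + 1)) = counts lab xs 0 := by
        apply ih p (base + 1) base 0 (c0 + c) hbase
        intro i hi
        have := hpre (i + 1) (by simpa using Nat.succ_le_succ hi)
        have harr : base + 1 + i = base + (i + 1) := by omega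
        rw [harr, this]
        have : ((("next_row" : String) :: xs).take (i + 1)).count lab = (xs.take i).count lab := by
          simp [List.count_cons, hlab, Ne.symm hlab, beq_iff_eq]
        rw [this]; ring
      simp only [marksIdx, counts, reduceIte, colGo]
      rw [htail, hbase, hprev]
      have : c0 + c - c0 = c := by ring
      rw [this]
    · simp only [marksIdx, counts, if_neg hm]
      apply ih p (base + 1) prev (c + if x = lab then 1 else 0) c0 hprev
      intro i hi
      have := hpre (i + 1) (by simpa using Nat.succ_le_succ hi)
      have harr : base + 1 + i = base + (i + 1) := by omega
      rw [harr, this]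
      by_cases hx : x = lab <;> simp [List.count_cons, hx, beq_iff_eq] <;> push_cast <;> ring

lemma column_counts (lab : String) (hlab : lab ≠ "next_row") (xs : List String) :
    column lab xs = counts lab xs 0 := by
  unfold column prefs
  apply colGo_counts lab hlab xs _ 0 0 0 0 (by simp)
  intro i hi
  have := prefGo_getD lab xs 0 i hi
  simpa using this

-- ===== VERDICT (by name: the statement is the Claim_ definition above) =====
theorem sector_columns_spec : Claim_equal_sector_columns := by
  intro xs _
  unfold Spec_sector_columns sector_columns sector_columns_alt
  have hA := foldA xs
    { s1 := [], s2 := [], s3 := [], s4 := [], s5 := [], s6 := [], s7 := [], s8 := [], s9 := [],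
      c1 := 0, c2 := 0, c3 := 0, c4 := 0, c5 := 0, c6 := 0, c7 := 0, c8 := 0, c9 := 0 }
  simp only [Prod.mk.injEq] at hA
  simp only []
  rw [column_counts "11" (by decide), column_counts "12" (by decide),
      column_counts "13" (by decide), column_counts "21" (by decide),
      column_counts "22" (by decide), column_counts "23" (by decide),
      column_counts "31" (by decide), column_counts "32" (by decide),
      column_counts "33" (by decide)]
  exact Prod.ext (by simp [hA.1]) (Prod.ext (by simp [hA.2.1]) (Prod.ext (by simp [hA.2.2.1])
    (Prod.ext (by simp [hA.2.2.2.1]) (Prod.ext (by simp [hA.2.2.2.2.1])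
    (Prod.ext (by simp [hA.2.2.2.2.2.1]) (Prod.ext (by simp [hA.2.2.2.2.2.2.1])
    (Prod.ext (by simp [hA.2.2.2.2.2.2.2.1]) (by simp [hA.2.2.2.2.2.2.2.2]))))))))
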